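-- pv_equiv track=rewrite | github.com/981377660LMT/algorithm-study | tmp/20230218/4.py | getLCP
-- ===== SOURCE A (Python) =====
-- from typing import List, Tuple, Optional
-- from typing import List
-- from typing import DefaultDict, List
--
-- def getLCP(s: str) -> List[List[int]]:
--     n = len(s)
--     lcp = [[0] * (n + 1) for _ in range(n + 1)]
--     for i in range(n - 1, -1, -1):
--         for j in range(n - 1, -1, -1):
--             if s[i] == s[j]:
--                 lcp[i][j] = lcp[i + 1][j + 1] + 1
--     return [row[:-1] for row in lcp[:-1]]
-- ===== SOURCE B (Python) =====
-- from typing import List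
--
--
-- def getLCP(s: str) -> List[List[int]]:
--     n = len(s)
--     res = []
--     for i in range(n):
--         row = []
--         for j in range(n):
--             k = 0
--             while i + k < n and j + k < n and s[i + k] == s[j + k]:
--                 k += 1
--             row.append(k)
--         res.append(row)
--     return res
-- ===== Notes on version B (the rewrite author's own statement) =====
-- stated objective: alternative
-- what changed: Replaces the backward DP over an (n+1)x(n+1) padded table (with final trimming) by a direct per-pair forward extension scan that builds the n x n matrix directly; it trades speed on large inputs for directness (no DP table, no padding/trim).
import Mathlib
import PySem

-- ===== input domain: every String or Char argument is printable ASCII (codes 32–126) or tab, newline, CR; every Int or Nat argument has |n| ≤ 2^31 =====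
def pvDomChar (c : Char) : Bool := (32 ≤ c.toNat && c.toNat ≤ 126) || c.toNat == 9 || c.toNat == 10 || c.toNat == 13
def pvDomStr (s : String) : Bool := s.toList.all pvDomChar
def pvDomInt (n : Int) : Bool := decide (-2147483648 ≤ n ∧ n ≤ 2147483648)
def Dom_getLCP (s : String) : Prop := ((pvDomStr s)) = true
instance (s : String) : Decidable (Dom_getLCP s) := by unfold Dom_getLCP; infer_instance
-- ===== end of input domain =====

-- B replaces A's backward DP over an (n+1)×(n+1) padded table (then trimmed) by a direct
-- per-pair forward extension scan building the n×n matrix directly; objective: simpler.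

-- ===== PORT A =====
-- cell read/write helpers for the mutated 2-D list (all accesses A makes are in range,
-- so getD's defaults are never used)
def pvCellGet (m : List (List Int)) (i j : Nat) : Int := (m.getD i []).getD j 0
def pvCellSet (m : List (List Int)) (i j : Nat) (v : Int) : List (List Int) :=
  m.set i ((m.getD i []).set j v)

-- range(n-1,-1,-1) is ported as (List.range n).reverse
def getLCP (s : String) : List (List Int) :=
  let cs := s.toList
  let n := cs.length
  let init : List (List Int) := List.replicate (n + 1) (List.replicate (n + 1) (0 : Int))
  let final := (List.range n).reverse.foldl (fun m i =>
    (List.range n).reverse.foldl (fun m j =>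
      if cs.getD i ' ' = cs.getD j ' ' then
        pvCellSet m i j (pvCellGet m (i + 1) (j + 1) + 1)
      else m) m) init
  (final.dropLast).map (fun row => row.dropLast)

-- ===== PORT B =====
-- the inner `while i+k<n and j+k<n and s[i+k]==s[j+k]: k+=1` counting loop
def pvExt (cs : List Char) (i j : Nat) : Nat :=
  if h : i < cs.length ∧ j < cs.length ∧ cs.getD i ' ' = cs.getD j ' ' then
    pvExt cs (i + 1) (j + 1) + 1
  else 0
termination_by cs.length - i

def getLCP_alt (s : String) : List (List Int) :=
  let cs := s.toList
  let n := cs.length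
  (List.range n).map (fun i => (List.range n).map (fun j => (pvExt cs i j : Int)))

-- ===== PRECONDITION & SPEC =====
def Spec_getLCP (s : String) (out : List (List Int)) : Prop := out = getLCP_alt s
instance (s : String) (out : List (List Int)) : Decidable (Spec_getLCP s out) := by unfold Spec_getLCP; infer_instance

-- ===== CLAIM (what is proved, stated in full; the proofs are below) =====
def Claim_equal_getLCP : Prop := ∀ (s : String), Dom_getLCP s → Spec_getLCP s (getLCP s)

-- ===== LEMMAS AND PROOFS =====

theorem pvExt_eq (cs : List Char) (i j : Nat) :
    pvExt cs i j =
      if i < cs.length ∧ j < cs.length ∧ cs.getD i ' ' = cs.getD j ' ' then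
        pvExt cs (i + 1) (j + 1) + 1
      else 0 := by
  rw [pvExt]; simp only [dite_eq_ite]

theorem pvExt_out_left (cs : List Char) (i j : Nat) (h : ¬ i < cs.length) :
    pvExt cs i j = 0 := by rw [pvExt_eq]; simp [h]

theorem pvExt_out_right (cs : List Char) (i j : Nat) (h : ¬ j < cs.length) :
    pvExt cs i j = 0 := by rw [pvExt_eq]; simp [h]

theorem pvGetD_set {α : Type} (l : List α) (i n : Nat) (a d : α) :
    (l.set i a).getD n d = if i = n ∧ i < l.length then a else l.getD n d := by
  rw [List.getD_eq_getElem?_getD, List.getD_eq_getElem?_getD, List.getElem?_set]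
  rcases eq_or_ne i n with rfl | hne
  · by_cases hi : i < l.length
    · simp [hi]
    · simp [hi]
  · simp [hne]

theorem length_pvCellSet (m : List (List Int)) (i j : Nat) (v : Int) :
    (pvCellSet m i j v).length = m.length := by simp [pvCellSet]

theorem rowlen_pvCellSet (m : List (List Int)) (i j r : Nat) (v : Int) :
    ((pvCellSet m i j v).getD r []).length = (m.getD r []).length := by
  unfold pvCellSet
  rw [pvGetD_set]
  split_ifs with h
  · obtain ⟨rfl, hi⟩ := h; simp
  · rfl

theorem pvCellGet_set_ne_row (m : List (List Int)) (i j r c : Nat) (v : Int) (h : r ≠ i) :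
    pvCellGet (pvCellSet m i j v) r c = pvCellGet m r c := by
  unfold pvCellGet pvCellSet
  rw [pvGetD_set, if_neg (by tauto)]

theorem pvCellGet_set_ne_col (m : List (List Int)) (i j r c : Nat) (v : Int) (h : c ≠ j) :
    pvCellGet (pvCellSet m i j v) r c = pvCellGet m r c := by
  unfold pvCellGet pvCellSet
  rw [pvGetD_set]
  split_ifs with hir
  · obtain ⟨rfl, hi⟩ := hir
    rw [pvGetD_set, if_neg (by tauto)]
  · rfl

theorem pvCellGet_set_self (m : List (List Int)) (i j : Nat) (v : Int)
    (hi : i < m.length) (hj : j < (m.getD i []).length) :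
    pvCellGet (pvCellSet m i j v) i j = v := by
  unfold pvCellGet pvCellSet
  rw [pvGetD_set, if_pos ⟨rfl, hi⟩, pvGetD_set, if_pos ⟨rfl, hj⟩]

-- the inner loop over row i: writes only row i, reads only row i+1
theorem inner_fold_cells (cs : List Char) (n : Nat) (hn : n = cs.length) (i : Nat)
    (hi : i < n) (L : List Nat) (m : List (List Int))
    (hlen : m.length = n + 1) (hrows : ∀ r, r < n + 1 → (m.getD r []).length = n + 1)
    (hL : ∀ j ∈ L, j < n) :
    let m' := L.foldl (fun m j =>
      if cs.getD i ' ' = cs.getD j ' ' then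
        pvCellSet m i j (pvCellGet m (i + 1) (j + 1) + 1)
      else m) m
    m'.length = n + 1 ∧ (∀ r, r < n + 1 → (m'.getD r []).length = n + 1) ∧
      ∀ r c, pvCellGet m' r c =
        if r = i ∧ c ∈ L ∧ cs.getD i ' ' = cs.getD c ' ' then
          pvCellGet m (i + 1) (c + 1) + 1
        else pvCellGet m r c := by
  induction L generalizing m with
  | nil =>
    intro m'
    refine ⟨hlen, hrows, ?_⟩
    intro r c
    rw [if_neg (by simp)]
    rfl
  | cons j L ih =>
    intro m'
    have hj : j < n := hL j (by simp)
    set m1 := if cs.getD i ' ' = cs.getD j ' ' then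
        pvCellSet m i j (pvCellGet m (i + 1) (j + 1) + 1) else m with hm1
    have hm'eq : m' = L.foldl (fun m j =>
        if cs.getD i ' ' = cs.getD j ' ' then
          pvCellSet m i j (pvCellGet m (i + 1) (j + 1) + 1)
        else m) m1 := by rw [hm1]; rfl
    have hlen1 : m1.length = n + 1 := by
      rw [hm1]; split_ifs
      · rw [length_pvCellSet]; exact hlen
      · exact hlen
    have hrows1 : ∀ r, r < n + 1 → (m1.getD r []).length = n + 1 := by
      intro r hr; rw [hm1]; split_ifs
      · rw [rowlen_pvCellSet]; exact hrows r hr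
      · exact hrows r hr
    have hrow_succ : ∀ c, pvCellGet m1 (i + 1) c = pvCellGet m (i + 1) c := by
      intro c; rw [hm1]; split_ifs with hc
      · exact pvCellGet_set_ne_row _ _ _ _ _ _ (by omega)
      · rfl
    have hcell1 : ∀ r c, pvCellGet m1 r c =
        if r = i ∧ c = j ∧ cs.getD i ' ' = cs.getD c ' ' then
          pvCellGet m (i + 1) (c + 1) + 1
        else pvCellGet m r c := by
      intro r c
      rw [hm1]
      split_ifs with heq hP hP
      · obtain ⟨h1', h2', h3'⟩ := hP
        subst h1'; subst h2'
        exact pvCellGet_set_self m r c _ (by omega) (by rw [hrows r (by omega)]; omega)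
      · by_cases hr : r = i
        · subst hr
          have hc : c ≠ j := fun hcj => hP ⟨rfl, hcj, by rwa [hcj]⟩
          exact pvCellGet_set_ne_col _ _ _ _ _ _ hc
        · exact pvCellGet_set_ne_row _ _ _ _ _ _ hr
      · exfalso
        obtain ⟨h1', h2', h3'⟩ := hP
        subst h2'; exact heq h3'
      · rfl
    obtain ⟨h1, h2, h3⟩ := ih m1 hlen1 hrows1 (fun j hj => hL j (by simp [hj]))
    rw [hm'eq]
    refine ⟨h1, h2, ?_⟩
    intro r c
    rw [h3 r c]
    by_cases hfin : r = i ∧ c ∈ j :: L ∧ cs.getD i ' ' = cs.getD c ' '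
    · rw [if_pos hfin]
      obtain ⟨rfl, hmem, heq⟩ := hfin
      rcases List.mem_cons.mp hmem with rfl | hmemL
      · by_cases hcL : c ∈ L
        · rw [if_pos ⟨rfl, hcL, heq⟩, hrow_succ]
        · rw [if_neg (by tauto), hcell1, if_pos ⟨rfl, rfl, heq⟩]
      · rw [if_pos ⟨rfl, hmemL, heq⟩, hrow_succ]
    · rw [if_neg hfin]
      rw [if_neg (by tauto), hcell1]
      rw [if_neg (by intro ⟨h1', h2', h3'⟩; exact hfin ⟨h1', by simp [h2'], h3'⟩)]

-- the outer loop: after processing rows k-1 .. 0, every cell holds pvExt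
theorem outer_fold_cells (cs : List Char) (n : Nat) (hn : n = cs.length) (k : Nat)
    (hk : k ≤ n) (m : List (List Int))
    (hlen : m.length = n + 1) (hrows : ∀ r, r < n + 1 → (m.getD r []).length = n + 1)
    (hcell : ∀ r c, r < n + 1 → c < n + 1 →
      pvCellGet m r c = if k ≤ r then (pvExt cs r c : Int) else 0) :
    let m' := (List.range k).reverse.foldl (fun m i =>
      (List.range n).reverse.foldl (fun m j =>
        if cs.getD i ' ' = cs.getD j ' ' then
          pvCellSet m i j (pvCellGet m (i + 1) (j + 1) + 1)
        else m) m) m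
    m'.length = n + 1 ∧ (∀ r, r < n + 1 → (m'.getD r []).length = n + 1) ∧
      ∀ r c, r < n + 1 → c < n + 1 → pvCellGet m' r c = (pvExt cs r c : Int) := by
  induction k generalizing m with
  | zero =>
    intro m'
    exact ⟨hlen, hrows, fun r c hr hc => by
      show pvCellGet m r c = _
      rw [hcell r c hr hc, if_pos (Nat.zero_le r)]⟩
  | succ k ih =>
    intro m'
    have hsplit : (List.range (k + 1)).reverse = k :: (List.range k).reverse := by
      rw [List.range_succ, List.reverse_append]; rfl
    have hkn : k < n := by omega
    obtain ⟨h1, h2, h3⟩ := inner_fold_cells cs n hn k hkn (List.range n).reverse m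
      hlen hrows (by simp)
    set m1 := (List.range n).reverse.foldl (fun m j =>
      if cs.getD k ' ' = cs.getD j ' ' then
        pvCellSet m k j (pvCellGet m (k + 1) (j + 1) + 1)
      else m) m with hm1
    have hcell1 : ∀ r c, r < n + 1 → c < n + 1 →
        pvCellGet m1 r c = if k ≤ r then (pvExt cs r c : Int) else 0 := by
      intro r c hr hc
      rw [h3 r c]
      by_cases hcond : r = k ∧ c ∈ (List.range n).reverse ∧ cs.getD k ' ' = cs.getD c ' '
      · rw [if_pos hcond]
        obtain ⟨rfl, hcmem, heq⟩ := hcond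
        have hcn : c < n := by simpa using hcmem
        rw [hcell (r + 1) (c + 1) (by omega) (by omega), if_pos (by omega),
          if_pos (le_refl r)]
        have : pvExt cs r c = pvExt cs (r + 1) (c + 1) + 1 := by
          rw [pvExt_eq, if_pos ⟨by omega, by omega, heq⟩]
        rw [this]; push_cast; ring
      · rw [if_neg hcond, hcell r c hr hc]
        by_cases hkr : k ≤ r
        · rw [if_pos hkr]
          by_cases hk1r : k + 1 ≤ r
          · rw [if_pos hk1r]
          · rw [if_neg hk1r]
            have hrk : r = k := by omega
            subst hrk
            by_cases hcn : c < n
            · have heqn : ¬ cs.getD r ' ' = cs.getD c ' ' := by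
                intro heq; exact hcond ⟨rfl, by simpa using hcn, heq⟩
              rw [pvExt_eq, if_neg (by tauto)]; rfl
            · rw [pvExt_out_right cs r c (by omega)]; rfl
        · rw [if_neg hkr, if_neg (by omega)]
    have hm'eq : m' = (List.range k).reverse.foldl (fun m i =>
        (List.range n).reverse.foldl (fun m j =>
          if cs.getD i ' ' = cs.getD j ' ' then
            pvCellSet m i j (pvCellGet m (i + 1) (j + 1) + 1)
          else m) m) m1 := by
      show (List.range (k + 1)).reverse.foldl _ m = _
      rw [hsplit, List.foldl_cons]
    rw [hm'eq]
    exact ih (by omega) m1 h1 h2 hcell1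

theorem getLCP_core (s : String) : getLCP s = getLCP_alt s := by
  have hmain : ∀ cs : List Char,
      (((List.range cs.length).reverse.foldl (fun m i =>
          (List.range cs.length).reverse.foldl (fun m j =>
            if cs.getD i ' ' = cs.getD j ' ' then
              pvCellSet m i j (pvCellGet m (i + 1) (j + 1) + 1)
            else m) m)
          (List.replicate (cs.length + 1) (List.replicate (cs.length + 1) (0 : Int)))).dropLast).map
        (fun row => row.dropLast)
      = (List.range cs.length).map (fun i =>
          (List.range cs.length).map (fun j => (pvExt cs i j : Int))) := by
    intro cs
    have hrows0 : ∀ r, r < cs.length + 1 →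
        ((List.replicate (cs.length + 1) (List.replicate (cs.length + 1) (0 : Int))).getD r []).length
          = cs.length + 1 := by
      intro r hr
      rw [List.getD_eq_getElem _ _ (by simpa using hr), List.getElem_replicate]
      simp
    have hinit : ∀ r c, r < cs.length + 1 → c < cs.length + 1 →
        pvCellGet (List.replicate (cs.length + 1) (List.replicate (cs.length + 1) (0 : Int))) r c
          = if cs.length ≤ r then (pvExt cs r c : Int) else 0 := by
      intro r c hr hc
      have hrow : (List.replicate (cs.length + 1) (List.replicate (cs.length + 1) (0 : Int))).getD r []
          = List.replicate (cs.length + 1) (0 : Int) := by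
        rw [List.getD_eq_getElem _ _ (by simpa using hr), List.getElem_replicate]
      have h0 : pvCellGet (List.replicate (cs.length + 1) (List.replicate (cs.length + 1) (0 : Int))) r c = 0 := by
        unfold pvCellGet
        rw [hrow, List.getD_eq_getElem _ _ (by simpa using hc), List.getElem_replicate]
      rw [h0]
      by_cases hnr : cs.length ≤ r
      · rw [if_pos hnr, pvExt_out_left cs r c (by omega)]; rfl
      · rw [if_neg hnr]
    obtain ⟨h1, h2, h3⟩ := outer_fold_cells cs cs.length rfl cs.length le_rfl
      (List.replicate (cs.length + 1) (List.replicate (cs.length + 1) (0 : Int)))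
      (by simp) hrows0 hinit
    set F := (List.range cs.length).reverse.foldl (fun m i =>
        (List.range cs.length).reverse.foldl (fun m j =>
          if cs.getD i ' ' = cs.getD j ' ' then
            pvCellSet m i j (pvCellGet m (i + 1) (j + 1) + 1)
          else m) m)
        (List.replicate (cs.length + 1) (List.replicate (cs.length + 1) (0 : Int))) with hF
    apply List.ext_getElem
    · rw [List.length_map, List.length_dropLast, h1, List.length_map, List.length_range]
      omega
    · intro r h₁ h₂
      have hr : r < cs.length := by
        rw [List.length_map, List.length_range] at h₂; exact h₂
      have hrF : r < F.length := by omega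
      have hrowlen : F[r].length = cs.length + 1 := by
        have := h2 r (by omega)
        rwa [List.getD_eq_getElem _ _ hrF] at this
      rw [List.getElem_map, List.getElem_map, List.getElem_dropLast, List.getElem_range]
      apply List.ext_getElem
      · rw [List.length_dropLast, hrowlen, List.length_map, List.length_range]
        omega
      · intro c hc₁ hc₂
        have hcn : c < cs.length := by
          rw [List.length_map, List.length_range] at hc₂; exact hc₂
        rw [List.getElem_dropLast, List.getElem_map, List.getElem_range]
        have h := h3 r c (by omega) (by omega)
        have hacc : pvCellGet F r c = (F[r]'hrF)[c]'(by rw [hrowlen]; omega) := by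
          unfold pvCellGet
          rw [List.getD_eq_getElem _ _ hrF, List.getD_eq_getElem _ _ (by rw [hrowlen]; omega)]
        exact hacc.symm.trans h
  exact hmain s.toList

-- ===== VERDICT (by name: the statement is the Claim_ definition above) =====
theorem getLCP_spec : Claim_equal_getLCP := by
  intro s _
  unfold Spec_getLCP
  exact getLCP_core s
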